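-- pv_equiv track=rewrite | github.com/whatsyourask/university | lab1.py | get_max_min
-- ===== SOURCE A (Python) =====
-- def get_max_min(data):
--   x = []
--   y = []
--   z = []
--   for elem in data:
--     if 'v' in elem:
--       x.append(elem[1])
--       y.append(elem[2])
--       z.append(elem[3])
--   max_x = max(x)
--   min_x = min(x)
--   max_y = max(y)
--   min_y = min(y)
--   max_z = max(z)
--   min_z = min(z)
--   return max_x, min_x, max_y, min_y, max_z, min_z
-- ===== SOURCE B (Python) =====
-- def get_max_min(data):
--   found = False
--   for elem in data:
--     if 'v' in elem:
--       _, xv, yv, zv = elem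
--       if not found:
--         found = True
--         max_x = min_x = xv
--         max_y = min_y = yv
--         max_z = min_z = zv
--       else:
--         if xv > max_x: max_x = xv
--         if xv < min_x: min_x = xv
--         if yv > max_y: max_y = yv
--         if yv < min_y: min_y = yv
--         if zv > max_z: max_z = zv
--         if zv < min_z: min_z = zv
--   if not found:
--     raise ValueError("max() arg is an empty sequence")
--   return max_x, min_x, max_y, min_y, max_z, min_z
-- ===== Notes on version B (the rewrite author's own statement) =====
-- stated objective: simpler
-- what changed: One pass maintaining six running scalars (first match initializes, later matches compare-and-update) instead of building three filtered lists and scanning them six times with max()/min().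
import Mathlib
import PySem

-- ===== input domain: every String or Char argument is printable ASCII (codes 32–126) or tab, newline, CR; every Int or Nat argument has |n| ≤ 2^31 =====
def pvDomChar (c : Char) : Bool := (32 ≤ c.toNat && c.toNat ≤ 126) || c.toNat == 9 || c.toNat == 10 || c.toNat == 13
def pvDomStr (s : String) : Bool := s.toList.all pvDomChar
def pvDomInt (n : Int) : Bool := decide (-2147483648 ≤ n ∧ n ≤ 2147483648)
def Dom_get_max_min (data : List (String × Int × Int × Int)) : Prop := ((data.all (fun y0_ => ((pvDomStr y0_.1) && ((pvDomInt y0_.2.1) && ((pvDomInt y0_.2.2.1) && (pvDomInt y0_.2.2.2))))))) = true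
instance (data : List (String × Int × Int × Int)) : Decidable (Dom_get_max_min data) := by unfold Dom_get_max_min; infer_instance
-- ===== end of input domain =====

-- B replaces A's three filtered lists + six max()/min() scans by a single pass with six running scalars (objective: simpler).


-- ===== PORT A =====
-- `'v' in elem` on a (str,int,int,int) tuple is element equality: true iff elem[0] == 'v'.
-- max(xs)/min(xs) raise ValueError on []; ported as PySem.List.max?/min? with .getD 0, excluded by Pre_.
def get_max_min (data : List (String × Int × Int × Int)) : Int × Int × Int × Int × Int × Int :=
  let xyz := data.foldl
    (fun (s : List Int × List Int × List Int) elem =>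
      if elem.1 == "v" then
        (s.1 ++ [elem.2.1], s.2.1 ++ [elem.2.2.1], s.2.2 ++ [elem.2.2.2])
      else s)
    ([], [], [])
  let max_x := (PySem.List.max? xyz.1 (fun v => v)).getD 0
  let min_x := (PySem.List.min? xyz.1 (fun v => v)).getD 0
  let max_y := (PySem.List.max? xyz.2.1 (fun v => v)).getD 0
  let min_y := (PySem.List.min? xyz.2.1 (fun v => v)).getD 0
  let max_z := (PySem.List.max? xyz.2.2 (fun v => v)).getD 0
  let min_z := (PySem.List.min? xyz.2.2 (fun v => v)).getD 0
  (max_x, min_x, max_y, min_y, max_z, min_z)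

-- ===== PORT B =====
-- single pass; state = none until the first matching row (B raises ValueError when it stays none, excluded by Pre_)
def gmmStep (acc : Option (Int × Int × Int × Int × Int × Int)) (elem : String × Int × Int × Int) :
    Option (Int × Int × Int × Int × Int × Int) :=
  if elem.1 == "v" then
    match acc with
    | none => some (elem.2.1, elem.2.1, elem.2.2.1, elem.2.2.1, elem.2.2.2, elem.2.2.2)
    | some (mx, nx, my, ny, mz, nz) =>
        some (max mx elem.2.1, min nx elem.2.1,
              max my elem.2.2.1, min ny elem.2.2.1,
              max mz elem.2.2.2, min nz elem.2.2.2)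
  else acc

def get_max_min_alt (data : List (String × Int × Int × Int)) : Int × Int × Int × Int × Int × Int :=
  (data.foldl gmmStep none).getD (0, 0, 0, 0, 0, 0)

-- ===== PRECONDITION & SPEC =====
-- A raises ValueError (max of an empty list) unless some row has first component "v"; Pre_ requires one.
def Pre_get_max_min (data : List (String × Int × Int × Int)) : Prop :=
  ∃ e ∈ data, e.1 = "v"
instance (data : List (String × Int × Int × Int)) : Decidable (Pre_get_max_min data) := by
  unfold Pre_get_max_min; infer_instance

def pvWitness_get_max_min : (List (String × Int × Int × Int)) := [("v", 1, 2, 3), ("w", 9, 9, 9)]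

def Spec_get_max_min (data : List (String × Int × Int × Int)) (out : Int × Int × Int × Int × Int × Int) : Prop := out = get_max_min_alt data
instance (data : List (String × Int × Int × Int)) (out : Int × Int × Int × Int × Int × Int) : Decidable (Spec_get_max_min data out) := by unfold Spec_get_max_min; infer_instance

-- ===== CLAIM (what is proved, stated in full; the proofs are below) =====
def Claim_equal_get_max_min : Prop := ∀ (data : List (String × Int × Int × Int)), Dom_get_max_min data → Pre_get_max_min data → Spec_get_max_min data (get_max_min data)

-- ===== LEMMAS AND PROOFS =====

-- A's accumulating fold builds the three projections of the filtered list.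
theorem gmm_foldA (data : List (String × Int × Int × Int)) (xs ys zs : List Int) :
    data.foldl
      (fun (s : List Int × List Int × List Int) elem =>
        if elem.1 == "v" then
          (s.1 ++ [elem.2.1], s.2.1 ++ [elem.2.2.1], s.2.2 ++ [elem.2.2.2])
        else s)
      (xs, ys, zs)
    = (xs ++ (data.filter (fun e => e.1 == "v")).map (fun e => e.2.1),
       ys ++ (data.filter (fun e => e.1 == "v")).map (fun e => e.2.2.1),
       zs ++ (data.filter (fun e => e.1 == "v")).map (fun e => e.2.2.2)) := by
  induction data generalizing xs ys zs with
  | nil => simp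
  | cons e t ih =>
      by_cases h : e.1 = "v"
      · have hb : (e.1 == "v") = true := by simp [h]
        simp only [List.foldl_cons, List.filter_cons, hb, if_true, List.map_cons]
        rw [ih]
        simp
      · have hb : (e.1 == "v") = false := by simp [h]
        simp only [List.foldl_cons, List.filter_cons, hb, Bool.false_eq_true, if_false]
        exact ih xs ys zs

-- B's fold over data equals B's fold over the filtered list.
theorem gmm_foldB_filter (data : List (String × Int × Int × Int))
    (acc : Option (Int × Int × Int × Int × Int × Int)) :
    data.foldl gmmStep acc = (data.filter (fun e => e.1 == "v")).foldl gmmStep acc := by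
  induction data generalizing acc with
  | nil => rfl
  | cons e t ih =>
      by_cases h : e.1 = "v"
      · have hb : (e.1 == "v") = true := by simp [h]
        simp only [List.foldl_cons, List.filter_cons, hb, if_true]
        exact ih _
      · have hb : (e.1 == "v") = false := by simp [h]
        simp only [List.foldl_cons, List.filter_cons, hb, Bool.false_eq_true, if_false, gmmStep]
        exact ih acc

-- On a list of matching rows, B's fold from a `some` state is the componentwise running max/min.
theorem gmm_foldB_some (l : List (String × Int × Int × Int))
    (hl : ∀ e ∈ l, e.1 = "v") (mx nx my ny mz nz : Int) :
    l.foldl gmmStep (some (mx, nx, my, ny, mz, nz))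
    = some ((l.map (fun e => e.2.1)).foldl max mx,
            (l.map (fun e => e.2.1)).foldl min nx,
            (l.map (fun e => e.2.2.1)).foldl max my,
            (l.map (fun e => e.2.2.1)).foldl min ny,
            (l.map (fun e => e.2.2.2)).foldl max mz,
            (l.map (fun e => e.2.2.2)).foldl min nz) := by
  induction l generalizing mx nx my ny mz nz with
  | nil => rfl
  | cons e t ih =>
      have he : e.1 = "v" := hl e (by simp)
      have ht : ∀ x ∈ t, x.1 = "v" := fun x hx => hl x (List.mem_cons_of_mem _ hx)
      simp only [List.foldl_cons, List.map_cons, gmmStep, he]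
      simp only [beq_self_eq_true, if_true]
      rw [ih ht]

theorem get_max_min_spec' (data : List (String × Int × Int × Int))
    (h : Pre_get_max_min data) : get_max_min data = get_max_min_alt data := by
  obtain ⟨e, he, hv⟩ := h
  have hne : data.filter (fun e => e.1 == "v") ≠ [] := by
    intro h0
    have hm : e ∈ data.filter (fun e => e.1 == "v") := by
      simp [List.mem_filter, he, hv]
    simp [h0] at hm
  obtain ⟨f, t, hft⟩ := List.exists_cons_of_ne_nil hne
  have hmem : ∀ x ∈ f :: t, x.1 = "v" := by
    intro x hx
    have : x ∈ data.filter (fun e => e.1 == "v") := hft ▸ hx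
    simpa using (List.mem_filter.mp this).2
  unfold get_max_min get_max_min_alt
  rw [gmm_foldB_filter, gmm_foldA, hft]
  simp only [List.nil_append, List.map_cons, List.foldl_cons,
    PySem.List.max?_id_cons, PySem.List.min?_id_cons]
  rw [gmmStep, if_pos (by simp [hmem f (by simp)]),
    gmm_foldB_some t (fun x hx => hmem x (by simp [hx]))]
  simp [List.foldl_map]

-- ===== VERDICT (by name: the statement is the Claim_ definition above) =====
theorem get_max_min_spec : Claim_equal_get_max_min := by
  intro data _ hpre
  unfold Spec_get_max_min
  exact get_max_min_spec' data hpre
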